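-- pv_equiv track=rewrite | github.com/Tanjastacy/petflix_3.0 | Petflix_2.1.py | pet_level_from_xp
-- ===== SOURCE A (Python) =====
-- PET_LEVEL_THRESHOLDS = [
--     0,
--     30,
--     60,
--     100,
--     150,
--     210,
--     280,
--     360,
--     450,
--     550,
--     660,
--     780,
--     910,
--     1050,
--     1200,
--     1360,
--     1530,
--     1710,
--     1900,
--     2100,
-- ]
--
-- def pet_level_from_xp(xp: int) -> int:
--     points = max(0, int(xp))
--     level = 0
--     for idx, threshold in enumerate(PET_LEVEL_THRESHOLDS, start=1):
--         if points < threshold: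
--             break
--         level = idx
--     return level
-- ===== SOURCE B (Python) =====
-- import bisect
--
-- PET_LEVEL_THRESHOLDS = [
--     0, 30, 60, 100, 150, 210, 280, 360, 450, 550,
--     660, 780, 910, 1050, 1200, 1360, 1530, 1710, 1900, 2100,
-- ]
--
-- def pet_level_from_xp(xp: int) -> int:
--     points = max(0, int(xp))
--     return bisect.bisect_right(PET_LEVEL_THRESHOLDS, points)
-- ===== Notes on version B (the rewrite author's own statement) =====
-- stated objective: idiomatic
-- what changed: Replaced the linear enumerate-and-break scan with a single bisect_right binary search over the sorted threshold list.
import Mathlib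
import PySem

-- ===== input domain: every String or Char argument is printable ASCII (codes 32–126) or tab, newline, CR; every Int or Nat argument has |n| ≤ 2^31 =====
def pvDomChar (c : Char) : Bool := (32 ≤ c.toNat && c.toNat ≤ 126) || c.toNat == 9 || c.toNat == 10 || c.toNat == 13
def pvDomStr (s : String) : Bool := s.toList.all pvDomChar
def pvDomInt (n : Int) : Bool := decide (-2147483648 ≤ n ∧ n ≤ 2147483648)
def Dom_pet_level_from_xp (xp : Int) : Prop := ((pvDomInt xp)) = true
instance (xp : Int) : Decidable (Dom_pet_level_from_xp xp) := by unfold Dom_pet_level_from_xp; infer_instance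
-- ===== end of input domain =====

-- B replaces A's linear enumerate-and-break scan with a bisect_right binary search (idiomatic).
-- ===== PORT A =====
def petThresholds : List Int :=
  [0, 30, 60, 100, 150, 210, 280, 360, 450, 550,
   660, 780, 910, 1050, 1200, 1360, 1530, 1710, 1900, 2100]

-- the for-loop with break: carries current level and the enumerate counter (start=1)
def petLoopA (points : Int) : Int → Int → List Int → Int
  | level, _, [] => level
  | level, idx, t :: rest => if points < t then level else petLoopA points idx (idx + 1) rest

def pet_level_from_xp (xp : Int) : Int :=
  let points := max 0 xp
  petLoopA points 0 1 petThresholds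

-- ===== PORT B =====
-- bisect.bisect_right, the standard lo/hi binary search
def bisectRight (a : List Int) (x : Int) (lo hi : Nat) : Nat :=
  if h : lo < hi then
    let mid := (lo + hi) / 2
    if x < a.getD mid 0 then bisectRight a x lo mid else bisectRight a x (mid + 1) hi
  else lo
termination_by hi - lo
decreasing_by all_goals omega

def pet_level_from_xp_alt (xp : Int) : Int :=
  let points := max 0 xp
  (bisectRight petThresholds points 0 petThresholds.length : Int)

-- ===== PRECONDITION & SPEC =====
def Spec_pet_level_from_xp (xp : Int) (out : Int) : Prop := out = pet_level_from_xp_alt xp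
instance (xp : Int) (out : Int) : Decidable (Spec_pet_level_from_xp xp out) := by unfold Spec_pet_level_from_xp; infer_instance

-- ===== CLAIM (what is proved, stated in full; the proofs are below) =====
def Claim_equal_pet_level_from_xp : Prop := ∀ (xp : Int), Dom_pet_level_from_xp xp → Spec_pet_level_from_xp xp (pet_level_from_xp xp)

-- ===== LEMMAS AND PROOFS =====

theorem loopA_char (p : Int) : ∀ (ts : List Int) (l : Int), List.Pairwise (· ≤ ·) ts →
    l ≤ petLoopA p l (l+1) ts ∧ petLoopA p l (l+1) ts ≤ l + ts.length ∧
      ∀ i : Nat, i < ts.length → (ts.getD i 0 ≤ p ↔ (l + i : Int) < petLoopA p l (l+1) ts) := by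
  intro ts
  induction ts with
  | nil => intro l _; simp [petLoopA]
  | cons t ts ih =>
    intro l hpw
    rw [List.pairwise_cons] at hpw
    obtain ⟨hhead, htail⟩ := hpw
    by_cases hlt : p < t
    · have hr : petLoopA p l (l+1) (t :: ts) = l := by simp [petLoopA, hlt]
      refine ⟨by omega, by rw [hr]; simp; positivity, ?_⟩
      intro i hi
      rw [hr]
      cases i with
      | zero => simp; omega
      | succ j =>
        simp only [List.getD_cons_succ]
        have hj : j < ts.length := by simpa using hi
        have hmem : ts.getD j 0 ∈ ts := by
          rw [List.getD_eq_getElem ts 0 hj]; exact List.getElem_mem hj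
        have := hhead _ hmem
        constructor
        · intro h; omega
        · intro h; exfalso; push_cast at h; omega
    · have hr : petLoopA p l (l+1) (t :: ts) = petLoopA p (l+1) ((l+1)+1) ts := by
        simp [petLoopA, hlt]
      obtain ⟨h1, h2, h3⟩ := ih (l+1) htail
      rw [hr]
      refine ⟨by omega, by simp only [List.length_cons]; push_cast; omega, ?_⟩
      intro i hi
      cases i with
      | zero => simp only [List.getD_cons_zero]; constructor
                · intro _; push_cast; omega
                · intro _; omega
      | succ j =>
        have hj : j < ts.length := by simpa using hi
        have := h3 j hj
        simp only [List.getD_cons_succ]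
        rw [this]
        constructor <;> (intro h; push_cast at *; omega)

theorem br_char (a : List Int) (x : Int) (T : Nat)
    (H : ∀ i : Nat, i < a.length → (a.getD i 0 ≤ x ↔ i < T)) :
    ∀ n lo hi, hi - lo ≤ n → lo ≤ hi → hi ≤ a.length → lo ≤ T → T ≤ hi →
      bisectRight a x lo hi = T := by
  intro n
  induction n with
  | zero =>
    intro lo hi h0 _ _ _ _
    rw [bisectRight]
    rw [dif_neg (by omega)]
    omega
  | succ n ih =>
    intro lo hi h0 h1 h2 h3 h4
    rw [bisectRight]
    by_cases h : lo < hi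
    · rw [dif_pos h]
      have hmid1 : lo ≤ (lo + hi) / 2 := by omega
      have hmid2 : (lo + hi) / 2 < hi := by omega
      have hmidlen : (lo + hi) / 2 < a.length := by omega
      have hiff := H _ hmidlen
      by_cases hx : x < a.getD ((lo + hi) / 2) 0
      · rw [if_pos hx]
        have hTm : T ≤ (lo + hi) / 2 := by
          by_contra hc
          have : a.getD ((lo + hi) / 2) 0 ≤ x := hiff.mpr (by omega)
          omega
        exact ih lo ((lo + hi) / 2) (by omega) (by omega) (by omega) h3 hTm
      · rw [if_neg hx]
        have hTm : (lo + hi) / 2 < T := hiff.mp (by omega)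
        exact ih ((lo + hi) / 2 + 1) hi (by omega) (by omega) h2 (by omega) h4
    · rw [dif_neg h]
      omega

-- ===== VERDICT (by name: the statement is the Claim_ definition above) =====
theorem pet_level_from_xp_spec : Claim_equal_pet_level_from_xp := by
  intro xp _
  unfold Spec_pet_level_from_xp pet_level_from_xp pet_level_from_xp_alt
  obtain ⟨h1, h2, h3⟩ := loopA_char (max 0 xp) petThresholds 0 (by decide)
  set r := petLoopA (max 0 xp) 0 (0+1) petThresholds with hrdef
  have hlen : petThresholds.length = 20 := by decide
  have hr0 : 0 ≤ r := by omega
  have hr20 : r ≤ 20 := by rw [hlen] at h2; omega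
  have hbr : bisectRight petThresholds (max 0 xp) 0 petThresholds.length = r.toNat := by
    apply br_char petThresholds (max 0 xp) r.toNat _ petThresholds.length 0 petThresholds.length
      (by omega) (by omega) (le_refl _) (by omega) (by rw [hlen]; omega)
    intro i hi
    rw [h3 i hi]
    omega
  have hfold : petLoopA (max 0 xp) 0 1 petThresholds = r := by rw [hrdef]; norm_num
  simp only [hbr, hfold]
  omega
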